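-- pv_equiv track=rewrite | github.com/gabrielaiji/projet_decompression_3D | src/todelete.py | classify_vertex
-- ===== SOURCE A (Python) =====
-- def get_edges(face):
--     """Return edges from a given face."""
--     return [(face[0], face[1]), (face[1], face[2]), (face[0], face[2])]
--
-- def classify_vertex(vertex, triangles):
--     """Return the classification of the vertex."""
--     edges = [get_edges(triangle) for triangle in triangles]
--     flat_edges = [edge for triangle_edges in edges for edge in triangle_edges]
--
--     edge_counts = {edge: flat_edges.count(edge) for edge in flat_edges}
--
--     for edge, count in edge_counts.items():
--         if vertex in edge and (count < 1 or count > 2):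
--             return "complex",None
--
--     boundary_edge = []
--     for edge, count in edge_counts.items():
--         if vertex in edge and count == 1:
--             boundary_edge = edge
--             return "boundary",boundary_edge
--     return "unclassified", None
-- ===== SOURCE B (Python) =====
-- def classify_vertex(vertex, triangles):
--     """Return the classification of the vertex."""
--     incident = [e for t in triangles if vertex in t
--                 for e in ((t[0], t[1]), (t[1], t[2]), (t[0], t[2]))
--                 if vertex in e]
--     s = sorted(incident)
--     # an edge occurs >= 3 times iff two equal entries sit two apart in the sorted list
--     if any(a == c for a, c in zip(s, s[2:])):
--         return "complex", None
--     # edges occurring >= 2 times = entries with an equal sorted neighbour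
--     dups = {a for a, b in zip(s, s[1:]) if a == b}
--     for e in incident:
--         if e not in dups:
--             return "boundary", e
--     return "unclassified", None
-- ===== Notes on version B (the rewrite author's own statement) =====
-- stated objective: faster
-- what changed: B replaces A's hash-counting (quadratic flat_edges.count per key plus two dict scans) by sort-then-adjacent-scan: it collects only the incident edges, sorts them, detects 'complex' as two equal entries two apart in the sorted list, reads off the duplicated edges from equal sorted neighbours, and returns the first incident edge not among them.
import Mathlib
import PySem

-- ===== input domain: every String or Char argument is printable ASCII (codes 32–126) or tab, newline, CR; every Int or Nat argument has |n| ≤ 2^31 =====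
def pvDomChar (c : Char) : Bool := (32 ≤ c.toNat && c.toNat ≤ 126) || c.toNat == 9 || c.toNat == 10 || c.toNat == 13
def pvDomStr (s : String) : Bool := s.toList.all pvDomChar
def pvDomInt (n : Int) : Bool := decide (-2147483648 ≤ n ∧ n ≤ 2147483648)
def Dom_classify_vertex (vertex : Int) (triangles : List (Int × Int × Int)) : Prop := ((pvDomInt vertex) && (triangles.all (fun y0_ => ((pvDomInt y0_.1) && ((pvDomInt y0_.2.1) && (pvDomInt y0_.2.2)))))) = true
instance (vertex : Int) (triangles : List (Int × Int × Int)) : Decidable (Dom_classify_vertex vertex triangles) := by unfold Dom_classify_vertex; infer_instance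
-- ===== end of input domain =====

-- B replaces A's per-key counting by sort-then-adjacent-scan over the incident edges only; measured faster.

-- ===== PORT A =====
def get_edges (face : Int × Int × Int) : List (Int × Int) :=
  [(face.1, face.2.1), (face.2.1, face.2.2), (face.1, face.2.2)]

-- first 'for edge, count in edge_counts.items()' loop of A (early return "complex")
def aLoop1 (vertex : Int) : List ((Int × Int) × Int) → Option (String × Option (Int × Int))
  | [] => none
  | (e, c) :: rest =>
    if (vertex == e.1 || vertex == e.2) && (decide (c < 1) || decide (2 < c)) then
      some ("complex", none)
    else aLoop1 vertex rest

-- second 'for edge, count in edge_counts.items()' loop of A (early return "boundary")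
def aLoop2 (vertex : Int) : List ((Int × Int) × Int) → String × Option (Int × Int)
  | [] => ("unclassified", none)
  | (e, c) :: rest =>
    if (vertex == e.1 || vertex == e.2) && c == 1 then ("boundary", some e)
    else aLoop2 vertex rest

def classify_vertex (vertex : Int) (triangles : List (Int × Int × Int)) : String × (Option (Int × Int)) :=
  let edges := triangles.map get_edges
  let flat_edges := edges.flatMap id
  let edge_counts := flat_edges.foldl (fun d e => d.insert e ((flat_edges.count e : Int))) PySem.Dict.empty
  match aLoop1 vertex edge_counts.items with
  | some r => r
  | none => aLoop2 vertex edge_counts.items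

-- ===== PORT B =====
-- Python's tuple comparison is lexicographic: sort key for sorted(incident)
def edgeKey (e : Int × Int) : Lex (Int × Int) := toLex e

-- B's final 'for e in incident: if e not in dups: return "boundary", e' loop
def bFind (dups : PySem.Set (Int × Int)) : List (Int × Int) → String × Option (Int × Int)
  | [] => ("unclassified", none)
  | e :: rest => if PySem.Set.contains dups e then bFind dups rest else ("boundary", some e)

def classify_vertex_alt (vertex : Int) (triangles : List (Int × Int × Int)) : String × (Option (Int × Int)) :=
  let incident := (triangles.filter (fun t => vertex == t.1 || vertex == t.2.1 || vertex == t.2.2)).flatMap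
    (fun t => [(t.1, t.2.1), (t.2.1, t.2.2), (t.1, t.2.2)].filter (fun e => vertex == e.1 || vertex == e.2))
  let s := PySem.List.sorted incident edgeKey false
  if (s.zip (s.drop 2)).any (fun p => p.1 == p.2) then ("complex", none)
  else
    let dups := PySem.Set.ofList (((s.zip (s.drop 1)).filter (fun p => p.1 == p.2)).map Prod.fst)
    bFind dups incident

-- ===== PRECONDITION & SPEC =====
def Spec_classify_vertex (vertex : Int) (triangles : List (Int × Int × Int)) (out : String × (Option (Int × Int))) : Prop := out = classify_vertex_alt vertex triangles
instance (vertex : Int) (triangles : List (Int × Int × Int)) (out : String × (Option (Int × Int))) : Decidable (Spec_classify_vertex vertex triangles out) := by unfold Spec_classify_vertex; infer_instance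

-- ===== CLAIM (what is proved, stated in full; the proofs are below) =====
def Claim_equal_classify_vertex : Prop := ∀ (vertex : Int) (triangles : List (Int × Int × Int)), Dom_classify_vertex vertex triangles → Spec_classify_vertex vertex triangles (classify_vertex vertex triangles)

-- ===== LEMMAS AND PROOFS =====

-- A's dict comprehension inserts a value that depends only on the key, so its getD is that value
theorem getD_foldl_insert_fn_not_mem (l : List (Int × Int)) (v : (Int × Int) → Int)
    (d : PySem.Dict (Int × Int) Int) (k : Int × Int) (h : k ∉ l) :
    (l.foldl (fun d e => d.insert e (v e)) d).getD k 0 = d.getD k 0 := by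
  induction l generalizing d with
  | nil => rfl
  | cons x xs ih =>
    simp only [List.mem_cons, not_or] at h
    simp [List.foldl_cons, ih _ h.2, PySem.Dict.getD_insert, h.1]

theorem getD_foldl_insert_fn_mem (l : List (Int × Int)) (v : (Int × Int) → Int)
    (d : PySem.Dict (Int × Int) Int) (k : Int × Int) (h : k ∈ l) :
    (l.foldl (fun d e => d.insert e (v e)) d).getD k 0 = v k := by
  induction l generalizing d with
  | nil => simp at h
  | cons x xs ih =>
    by_cases hx : k ∈ xs
    · simp [List.foldl_cons, ih _ hx]
    · have hk : k = x := by rcases List.mem_cons.mp h with h' | h' <;> tauto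
      subst hk
      simp [List.foldl_cons, getD_foldl_insert_fn_not_mem xs v _ k hx,
        PySem.Dict.getD_insert_self]

theorem items_foldl_insert_fn (l : List (Int × Int)) (v : (Int × Int) → Int) :
    (l.foldl (fun d e => d.insert e (v e)) PySem.Dict.empty).items
      = (PySem.Set.ofList l).map (fun k => (k, v k)) := by
  have hnd : (l.foldl (fun d e => d.insert e (v e)) PySem.Dict.empty).keys.Nodup :=
    PySem.Dict.nodup_keys_foldl_insert l (fun _ e => v e) _ PySem.Dict.nodup_keys_empty
  rw [PySem.Dict.items_eq_map_keys _ hnd 0,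
    PySem.Dict.keys_foldl_insert l (fun _ e => v e),
    PySem.Dict.keys_empty, PySem.Set.update_nil_left]
  apply List.map_congr_left
  intro k hk
  have hkl : k ∈ l := (PySem.Set.mem_ofList _ _).mp hk
  rw [getD_foldl_insert_fn_mem l v _ k hkl]

-- A's first loop is an 'any' over the dict items
theorem aLoop1_eq (v : Int) (l : List ((Int × Int) × Int)) :
    aLoop1 v l = if l.any (fun ec => (v == ec.1.1 || v == ec.1.2) && (decide (ec.2 < 1) || decide (2 < ec.2)))
      then some ("complex", none) else none := by
  induction l with
  | nil => simp [aLoop1]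
  | cons x xs ih =>
    obtain ⟨e, c⟩ := x
    show (if (v == e.1 || v == e.2) && (decide (c < 1) || decide (2 < c)) then
        some ("complex", (none : Option (Int × Int))) else aLoop1 v xs) = _
    rw [List.any_cons, ih]
    by_cases h : ((v == e.1 || v == e.2) && (decide (c < 1) || decide (2 < c))) = true
    · simp [h]
    · have h' := Bool.eq_false_iff.mpr (fun hh => h hh)
      rw [h', Bool.false_or]
      simp

-- A's second loop is a 'find?' over the dict items
theorem aLoop2_eq (v : Int) (l : List ((Int × Int) × Int)) :
    aLoop2 v l = match l.find? (fun ec => (v == ec.1.1 || v == ec.1.2) && ec.2 == 1) with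
      | some ec => ("boundary", some ec.1)
      | none => ("unclassified", none) := by
  induction l with
  | nil => simp [aLoop2]
  | cons x xs ih =>
    obtain ⟨e, c⟩ := x
    show (if (v == e.1 || v == e.2) && c == 1 then ("boundary", some e) else aLoop2 v xs) = _
    rw [List.find?_cons]
    by_cases h : ((v == e.1 || v == e.2) && c == 1) = true
    · simp [h]
    · have h' := Bool.eq_false_iff.mpr (fun hh => h hh)
      rw [h']
      simp [ih]

-- B's final loop is a 'find?' once membership in dups decides the predicate
theorem bFind_eq (d : PySem.Set (Int × Int)) (l : List (Int × Int)) (p : (Int × Int) → Bool)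
    (h : ∀ e ∈ l, d.contains e = !(p e)) :
    bFind d l = match l.find? p with
      | some e => ("boundary", some e)
      | none => ("unclassified", none) := by
  induction l with
  | nil => simp [bFind]
  | cons e rest ih =>
    show (if PySem.Set.contains d e then bFind d rest else ("boundary", some e)) = _
    rw [List.find?_cons, h e List.mem_cons_self]
    cases hp : p e with
    | true => simp
    | false =>
      simp only [Bool.not_false, if_true]
      exact ih (fun x hx => h x (List.mem_cons_of_mem _ hx))

-- first-match search is insensitive to first-occurrence deduplication
theorem find?_ofList (p : (Int × Int) → Bool) (l : List (Int × Int)) :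
    (PySem.Set.ofList l).find? p = l.find? p := by
  induction l using List.reverseRecOn with
  | nil => rfl
  | append_singleton xs x ih =>
    rw [PySem.Set.ofList_append_singleton, PySem.Set.add_eq_ite, List.find?_append]
    split_ifs with hx
    · rw [ih]
      cases hf : xs.find? p with
      | some y => simp
      | none =>
        have hnp : p x = false := by
          have := List.find?_eq_none.mp hf x ((PySem.Set.mem_ofList _ _).mp hx)
          exact Bool.eq_false_iff.mpr this
        simp [List.find?, hnp]
    · rw [List.find?_append, ih]

-- find? through a filter
theorem find?_filter' (q p : (Int × Int) → Bool) (l : List (Int × Int)) :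
    (l.filter q).find? p = l.find? (fun x => q x && p x) := by
  induction l with
  | nil => rfl
  | cons x xs ih =>
    rw [List.filter_cons, List.find?_cons]
    by_cases hq : q x = true
    · rw [if_pos hq, List.find?_cons]
      by_cases hp : p x = true
      · simp [hp, hq]
      · have hp' := Bool.eq_false_iff.mpr (fun hh => hp hh)
        simp [hp', hq, ih]
    · have hq' := Bool.eq_false_iff.mpr (fun hh => hq hh)
      simp [hq', ih]

-- keys of the lexicographic sort are antisymmetric
theorem edgeKey_antisymm {a b : Int × Int} (h1 : edgeKey a ≤ edgeKey b) (h2 : edgeKey b ≤ edgeKey a) :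
    a = b := by
  have := le_antisymm h1 h2
  simpa [edgeKey] using toLex.injective this

-- in a key-sorted list, two equal entries two apart exist iff some value occurs ≥ 3 times
theorem triple_adj_iff (S : List (Int × Int))
    (h : S.Pairwise (fun a b => edgeKey a ≤ edgeKey b)) :
    ((S.zip (S.drop 2)).any (fun p => p.1 == p.2)) = true ↔ ∃ e, 3 ≤ S.count e := by
  induction S with
  | nil => simp
  | cons a T ih =>
    cases T with
    | nil =>
      constructor
      · intro h'; simp at h'
      · rintro ⟨e, he⟩
        have h2 : List.count e [a] ≤ [a].length := List.count_le_length
        simp at h2; omega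
    | cons b U =>
      cases U with
      | nil =>
        constructor
        · intro h'; simp at h'
        · rintro ⟨e, he⟩
          have h2 : List.count e [a, b] ≤ [a, b].length := List.count_le_length
          simp at h2; omega
      | cons c V =>
        have hz : ((a :: b :: c :: V).zip ((a :: b :: c :: V).drop 2))
            = (a, c) :: ((b :: c :: V).zip ((b :: c :: V).drop 2)) := by
          simp [List.zip_cons_cons]
        rw [hz, List.any_cons]
        rw [List.pairwise_cons] at h
        obtain ⟨hA, hT⟩ := h
        have hTpc := hT
        rw [List.pairwise_cons] at hTpc
        obtain ⟨hB, hCV⟩ := hTpc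
        rw [List.pairwise_cons] at hCV
        obtain ⟨hC, _⟩ := hCV
        constructor
        · intro hor
          rcases Bool.or_eq_true_iff.mp hor with hac | hrest
          · have hac' : a = c := by simpa using hac
            have hba : edgeKey b ≤ edgeKey a := by rw [hac']; exact hB c (by simp)
            have hab : a = b := edgeKey_antisymm (hA b (by simp)) hba
            refine ⟨a, ?_⟩
            rw [← hab, ← hac', List.count_cons_self, List.count_cons_self,
              List.count_cons_self]
            omega
          · obtain ⟨e, he⟩ := (ih hT).mp hrest
            refine ⟨e, le_trans he ?_⟩
            rw [show List.count e (a :: b :: c :: V)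
                = List.count e (b :: c :: V) + (if (a == e) = true then 1 else 0)
              from List.count_cons]
            exact Nat.le_add_right _ _
        · rintro ⟨e, he⟩
          by_cases hT3 : 3 ≤ (b :: c :: V).count e
          · rw [Bool.or_eq_true]
            exact Or.inr ((ih hT).mpr ⟨e, hT3⟩)
          · have hea : e = a := by
              by_contra hne
              rw [List.count_cons_of_ne (fun hh => hne hh.symm)] at he
              exact hT3 he
            rw [hea, List.count_cons_self] at he
            have hcT : 2 ≤ List.count a (b :: c :: V) := by omega
            have hac : a = c := by
              by_cases hbc : c = a
              · exact hbc.symm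
              · by_cases hbe : b = a
                · rw [hbe, List.count_cons_self, List.count_cons_of_ne hbc] at hcT
                  have hVa : a ∈ V := List.count_pos_iff.mp (by omega)
                  exact absurd (edgeKey_antisymm (hA c (by simp)) (hC a hVa))
                    (fun hh => hbc hh.symm)
                · rw [List.count_cons_of_ne hbe, List.count_cons_of_ne hbc] at hcT
                  have hVa : a ∈ V := List.count_pos_iff.mp (by omega)
                  exact absurd
                    (edgeKey_antisymm (hA b (by simp)) (hB a (List.mem_cons_of_mem _ hVa)))
                    (fun hh => hbe hh.symm)
            rw [Bool.or_eq_true]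
            exact Or.inl (by simpa using hac)

-- in a key-sorted list, the entries with an equal neighbour are exactly the values occurring ≥ 2 times
theorem dup_adj_iff (S : List (Int × Int))
    (h : S.Pairwise (fun a b => edgeKey a ≤ edgeKey b)) (e : Int × Int) :
    (e ∈ ((S.zip (S.drop 1)).filter (fun p => p.1 == p.2)).map Prod.fst) ↔ 2 ≤ S.count e := by
  induction S with
  | nil => simp
  | cons a T ih =>
    cases T with
    | nil =>
      constructor
      · intro h'; simp at h'
      · intro he
        have h2 : List.count e [a] ≤ [a].length := List.count_le_length
        simp at h2; omega
    | cons b U =>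
      have hz : ((a :: b :: U).zip ((a :: b :: U).drop 1))
          = (a, b) :: ((b :: U).zip ((b :: U).drop 1)) := by
        simp [List.zip_cons_cons]
      rw [hz, List.filter_cons]
      rw [List.pairwise_cons] at h
      obtain ⟨hA, hT⟩ := h
      have hTpc := hT
      rw [List.pairwise_cons] at hTpc
      obtain ⟨hB, _⟩ := hTpc
      by_cases hab : a = b
      · rw [if_pos (by simpa using hab), List.map_cons]
        constructor
        · intro hm
          rcases List.mem_cons.mp hm with h' | h'
          · rw [h', ← hab, List.count_cons_self, List.count_cons_self]
            omega
          · exact le_trans ((ih hT).mp h')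
              (by
                rw [show List.count e (a :: b :: U)
                    = List.count e (b :: U) + (if (a == e) = true then 1 else 0)
                  from List.count_cons]
                exact Nat.le_add_right _ _)
        · intro h2
          by_cases hT2 : 2 ≤ (b :: U).count e
          · exact List.mem_cons_of_mem _ ((ih hT).mpr hT2)
          · have hea : e = a := by
              by_contra hne
              rw [List.count_cons_of_ne (fun hh => hne hh.symm)] at h2
              exact hT2 h2
            exact List.mem_cons.mpr (Or.inl hea)
      · rw [if_neg (by simpa using hab)]
        constructor
        · intro hm
          exact le_trans ((ih hT).mp hm)
            (by
              rw [show List.count e (a :: b :: U)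
                  = List.count e (b :: U) + (if (a == e) = true then 1 else 0)
                from List.count_cons]
              exact Nat.le_add_right _ _)
        · intro h2
          by_cases hT2 : 2 ≤ (b :: U).count e
          · exact (ih hT).mpr hT2
          · exfalso
            have hea : e = a := by
              by_contra hne
              rw [List.count_cons_of_ne (fun hh => hne hh.symm)] at h2
              exact hT2 h2
            rw [hea, List.count_cons_self] at h2
            have hmT : a ∈ b :: U := List.count_pos_iff.mp (by omega)
            rcases List.mem_cons.mp hmT with h' | h'
            · exact hab h'
            · exact hab (edgeKey_antisymm (hA b (by simp)) (hB a h'))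

-- B's incident-edge comprehension is the incident filter of A's flat edge list
theorem incident_eq (v : Int) (ts : List (Int × Int × Int)) :
    (ts.filter (fun t => v == t.1 || v == t.2.1 || v == t.2.2)).flatMap
      (fun t => [(t.1, t.2.1), (t.2.1, t.2.2), (t.1, t.2.2)].filter (fun e => v == e.1 || v == e.2))
    = ((ts.map get_edges).flatMap id).filter (fun e => v == e.1 || v == e.2) := by
  have hflat : (ts.map get_edges).flatMap id = ts.flatMap get_edges := by
    simp [List.flatMap_def]
  rw [hflat]
  clear hflat
  induction ts with
  | nil => rfl
  | cons t ts ih =>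
    rw [List.flatMap_cons, List.filter_append, ← ih, List.filter_cons]
    by_cases hq : (v == t.1 || v == t.2.1 || v == t.2.2) = true
    · rw [if_pos hq, List.flatMap_cons]
      simp only [get_edges]
    · rw [if_neg hq]
      have hq' : (v == t.1 || v == t.2.1 || v == t.2.2) = false := Bool.eq_false_iff.mpr hq
      simp only [Bool.or_eq_false_iff] at hq'
      have hnil : (get_edges t).filter (fun e => v == e.1 || v == e.2) = [] := by
        simp [get_edges, hq'.1.1, hq'.1.2, hq'.2]
      rw [hnil, List.nil_append]

-- ===== VERDICT (by name: the statement is the Claim_ definition above) =====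
theorem classify_vertex_spec : Claim_equal_classify_vertex := by
  intro vertex triangles _
  unfold Spec_classify_vertex classify_vertex classify_vertex_alt
  simp only []
  rw [incident_eq vertex triangles, items_foldl_insert_fn]
  set flat := ((triangles.map get_edges).flatMap id) with hflatdef
  set L := flat.filter (fun e => vertex == e.1 || vertex == e.2) with hLdef
  set S := PySem.List.sorted L edgeKey false with hSdef
  have hperm : S.Perm L := PySem.List.sorted_perm L edgeKey false
  have hpw : S.Pairwise (fun a b => edgeKey a ≤ edgeKey b) :=
    PySem.List.sorted_pairwise L edgeKey
  have hcntSL : ∀ e, S.count e = L.count e := fun e => hperm.count_eq e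
  have hcntLflat : ∀ e ∈ L, L.count e = flat.count e := by
    intro e he
    exact List.count_filter (List.mem_filter.mp he).2
  by_cases hany : ((S.zip (S.drop 2)).any (fun p => p.1 == p.2)) = true
  · rw [if_pos hany]
    obtain ⟨e, he3⟩ := (triple_adj_iff S hpw).mp hany
    have heS : e ∈ S := List.count_pos_iff.mp (by omega)
    have heL : e ∈ L := hperm.mem_iff.mp heS
    have hinc : (vertex == e.1 || vertex == e.2) = true := (List.mem_filter.mp heL).2
    have heflat : e ∈ flat := (List.mem_filter.mp heL).1
    have hcnt : 3 ≤ flat.count e := by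
      rw [← hcntLflat e heL, ← hcntSL e]; exact he3
    rw [aLoop1_eq]
    have hanyA : ((PySem.Set.ofList flat).map (fun k => (k, (flat.count k : Int)))).any
        (fun ec => (vertex == ec.1.1 || vertex == ec.1.2) && (decide (ec.2 < 1) || decide (2 < ec.2))) = true := by
      rw [List.any_map]
      refine List.any_eq_true.mpr ⟨e, (PySem.Set.mem_ofList flat e).mpr heflat, ?_⟩
      have h2 : (2 : Int) < (flat.count e : Int) := by exact_mod_cast hcnt
      simp [Function.comp, hinc, h2]
    rw [hanyA]
    simp
  · have hany' : ((S.zip (S.drop 2)).any (fun p => p.1 == p.2)) = false :=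
      Bool.eq_false_iff.mpr hany
    rw [hany']
    simp only [Bool.false_eq_true, if_false]
    have hnotriple : ∀ e, ¬ 3 ≤ S.count e := by
      intro e hc
      exact hany ((triple_adj_iff S hpw).mpr ⟨e, hc⟩)
    rw [aLoop1_eq]
    have hanyA : ((PySem.Set.ofList flat).map (fun k => (k, (flat.count k : Int)))).any
        (fun ec => (vertex == ec.1.1 || vertex == ec.1.2) && (decide (ec.2 < 1) || decide (2 < ec.2))) = false := by
      rw [List.any_map]
      refine Bool.eq_false_iff.mpr (fun hyes => ?_)
      obtain ⟨k, hk, hpk⟩ := List.any_eq_true.mp hyes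
      have hkflat : k ∈ flat := (PySem.Set.mem_ofList flat k).mp hk
      simp only [Function.comp, Bool.and_eq_true, Bool.or_eq_true, decide_eq_true_eq] at hpk
      have hpos : 0 < flat.count k := List.count_pos_iff.mpr hkflat
      have h3 : 3 ≤ flat.count k := by
        have h1 : (1 : Int) ≤ (flat.count k : Int) := by exact_mod_cast hpos
        rcases hpk.2 with hlt | hgt
        · omega
        · exact_mod_cast (by omega : (3 : Int) ≤ (flat.count k : Int))
      have hkL : k ∈ L := List.mem_filter.mpr ⟨hkflat, by
        rcases hpk with ⟨hi, _⟩
        exact (by simpa using hi)⟩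
      exact hnotriple k (by rw [hcntSL k, hcntLflat k hkL]; exact h3)
    rw [hanyA]
    simp only [Bool.false_eq_true, if_false]
    rw [aLoop2_eq, List.find?_map]
    have hcomp : ((fun (ec : (Int × Int) × Int) => (vertex == ec.1.1 || vertex == ec.1.2) && ec.2 == 1)
        ∘ (fun k => (k, (flat.count k : Int))))
        = fun k => (vertex == k.1 || vertex == k.2) && ((flat.count k : Int) == 1) := rfl
    rw [hcomp, find?_ofList, ← find?_filter']
    have hmemdups : ∀ e ∈ L,
        (PySem.Set.ofList (((S.zip (S.drop 1)).filter (fun p => p.1 == p.2)).map Prod.fst)).contains e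
          = !((flat.count e : Int) == 1) := by
      intro e heL
      have h1 : 1 ≤ S.count e := by
        rw [hcntSL e]
        exact List.count_pos_iff.mpr heL
      have hfc : flat.count e = S.count e := by
        rw [hcntSL e, hcntLflat e heL]
      by_cases hc2 : 2 ≤ S.count e
      · have hmem : e ∈ ((S.zip (S.drop 1)).filter (fun p => p.1 == p.2)).map Prod.fst :=
          (dup_adj_iff S hpw e).mpr hc2
        have hct : (PySem.Set.ofList (((S.zip (S.drop 1)).filter (fun p => p.1 == p.2)).map Prod.fst)).contains e = true :=
          (PySem.Set.contains_iff _ _).mpr ((PySem.Set.mem_ofList _ _).mpr hmem)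
        have hne : ¬ ((flat.count e : Int) = 1) := by
          have h3 := hnotriple e
          have : S.count e = 2 := by omega
          rw [hfc, this]
          omega
        rw [hct]
        simp [hne]
      · have hc1 : S.count e = 1 := by omega
        have hnmem : e ∉ ((S.zip (S.drop 1)).filter (fun p => p.1 == p.2)).map Prod.fst :=
          fun hm => hc2 ((dup_adj_iff S hpw e).mp hm)
        have hct : (PySem.Set.ofList (((S.zip (S.drop 1)).filter (fun p => p.1 == p.2)).map Prod.fst)).contains e = false := by
          refine Bool.eq_false_iff.mpr (fun hc => ?_)
          exact hnmem ((PySem.Set.mem_ofList _ _).mp ((PySem.Set.contains_iff _ _).mp hc))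
        rw [hct]
        have : (flat.count e : Int) = 1 := by rw [hfc, hc1]; rfl
        simp [this]
    rw [bFind_eq _ L (fun e => (flat.count e : Int) == 1) hmemdups]
    cases hf : L.find? (fun e => (flat.count e : Int) == 1) with
    | none => simp
    | some x => simp
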